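-- pv_equiv track=rewrite | github.com/kgaughan/komorebi | komorebi/blog.py | process_archive
-- ===== SOURCE A (Python) =====
-- def process_archive(records):
--     year = None
--     last_month = 0
--     for record in records:
--         # Pad out to the end of the year.
--         if record["year"] != year:
--             if last_month != 0:
--                 for i in range(1, 13 - last_month):
--                     yield {
--                         "n": 0,
--                         "year": year,
--                         "month": last_month + i,
--                     }
--             year = record["year"]
--             last_month = 0
--
--         # Pad out between months in a year.
--         if record["month"] - 1 != last_month:
--             for i in range(1, record["month"] - last_month):
--                 yield {
--                     "n": 0,
--                     "year": record["year"],
--                     "month": last_month + i,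
--                 }
--
--         yield record
--         last_month = record["month"]
-- ===== SOURCE B (Python) =====
-- def _group_years(records):
--     # Split records into maximal runs of consecutive records sharing a year,
--     # by scanning run boundaries with an index.
--     groups = []
--     i = 0
--     n = len(records)
--     while i < n:
--         j = i + 1
--         while j < n and records[j]["year"] == records[i]["year"]:
--             j += 1
--         groups.append(records[i:j])
--         i = j
--     return groups
--
--
-- def process_archive(records):
--     # Outer loop over consecutive year-groups; inner loop pads within a group.
--     prev = None  # (year, last month) of the previous group
--     for group in _group_years(list(records)):
--         year = group[0]["year"]
--         if prev is not None and prev[1] != 0: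
--             for m in range(prev[1] + 1, 13):
--                 yield {"n": 0, "year": prev[0], "month": m}
--         last = 0
--         for r in group:
--             for m in range(last + 1, r["month"]):
--                 yield {"n": 0, "year": year, "month": m}
--             yield r
--             last = r["month"]
--         prev = (year, last)
-- ===== Notes on version B (the rewrite author's own statement) =====
-- stated objective: alternative
-- what changed: Replaces A's flat single loop with mutable year/last_month state and a year-reset branch by a two-stage design: records are first grouped into maximal consecutive same-year runs, then a nested outer-over-groups / inner-over-records pass emits the previous group's tail padding at each group boundary and per-month padding inside a group.
import Mathlib
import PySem

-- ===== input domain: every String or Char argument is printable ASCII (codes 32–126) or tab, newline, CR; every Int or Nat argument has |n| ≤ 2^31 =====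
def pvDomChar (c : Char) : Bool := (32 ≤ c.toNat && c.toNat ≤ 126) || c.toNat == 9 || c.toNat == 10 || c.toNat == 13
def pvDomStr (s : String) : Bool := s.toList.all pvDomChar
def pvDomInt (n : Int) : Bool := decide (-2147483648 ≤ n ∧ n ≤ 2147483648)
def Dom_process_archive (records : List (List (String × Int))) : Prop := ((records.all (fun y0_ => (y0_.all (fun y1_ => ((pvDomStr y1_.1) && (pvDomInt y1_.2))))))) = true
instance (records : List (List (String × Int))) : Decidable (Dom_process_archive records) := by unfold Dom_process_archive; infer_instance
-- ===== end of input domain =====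

-- B replaces A's flat loop with mutable year/last_month state by a two-stage design:
-- group records into maximal consecutive same-year runs, then an outer loop over
-- groups (emitting the previous group's tail padding) with an inner per-group loop.
-- Both Pythons are generators; values are compared as the yielded sequence (a list here).

-- first-match lookup r[k] on the association list (Python dict access; none = KeyError)
def pvGetK (r : List (String × Int)) (k : String) : Option Int :=
  (r.find? (fun p => p.1 == k)).map (·.2)

-- ===== PORT A =====
-- the loop of A with its mutable state (year : Option Int, last_month) as arguments;
-- .getD 0 is only a totalisation: Pre_ guarantees the lookups succeed, and the
-- year.getD 0 in the year pad is only reached with last_month ≠ 0, where year is some _.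
def paGo (year : Option Int) (last_month : Int) : List (List (String × Int)) → List (List (String × Int))
  | [] => []
  | record :: rest =>
    let ry := (pvGetK record "year").getD 0
    let rm := (pvGetK record "month").getD 0
    let yearPad : List (List (String × Int)) :=
      if some ry ≠ year ∧ last_month ≠ 0 then
        (PySem.List.pyRange 1 (13 - last_month) 1).map
          (fun i => [("n", (0 : Int)), ("year", year.getD 0), ("month", last_month + i)])
      else []
    let lm : Int := if some ry ≠ year then 0 else last_month
    let monthPad : List (List (String × Int)) :=
      if rm - 1 ≠ lm then
        (PySem.List.pyRange 1 (rm - lm) 1).map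
          (fun i => [("n", (0 : Int)), ("year", ry), ("month", lm + i)])
      else []
    yearPad ++ monthPad ++ record :: paGo (some ry) rm rest

def process_archive (records : List (List (String × Int))) : List (List (String × Int)) :=
  paGo none 0 records

-- ===== PORT B =====
-- _group_years of Source B: the run found by the inner `while j < n and records[j]["year"] ==
-- records[i]["year"]` index scan is exactly the takeWhile/dropWhile split of the suffix.
def pvGroups : List (List (String × Int)) → List (List (List (String × Int)))
  | [] => []
  | r :: rest =>
    (r :: rest.takeWhile (fun s => (pvGetK s "year").getD 0 == (pvGetK r "year").getD 0))
      :: pvGroups (rest.dropWhile (fun s => (pvGetK s "year").getD 0 == (pvGetK r "year").getD 0))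
termination_by l => l.length
decreasing_by
  simp only [List.length_cons]
  exact Nat.lt_succ_of_le (List.length_dropWhile_le _ _)

-- the inner `for r in group` loop of Source B: returns (yielded list, final `last`)
def pvInner (year : Int) : List (List (String × Int)) → Int → List (List (String × Int)) × Int
  | [], last => ([], last)
  | r :: rest, last =>
    let rm := (pvGetK r "month").getD 0
    let res := pvInner year rest rm
    (((PySem.List.pyRange (last + 1) rm 1).map
        (fun m => [("n", (0 : Int)), ("year", year), ("month", m)])) ++ r :: res.1, res.2)

-- the outer `for group in _group_years(...)` loop of Source B, carrying prev = (year, last)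
def pvOuter : List (List (List (String × Int))) → Option (Int × Int) → List (List (String × Int))
  | [], _ => []
  | g :: gs, prev =>
    let year := (pvGetK (g.headD []) "year").getD 0
    let tailPad : List (List (String × Int)) :=
      match prev with
      | some (py, plm) =>
        if plm ≠ 0 then
          (PySem.List.pyRange (plm + 1) 13 1).map
            (fun m => [("n", (0 : Int)), ("year", py), ("month", m)])
        else []
      | none => []
    let res := pvInner year g 0
    tailPad ++ res.1 ++ pvOuter gs (some (year, res.2))

def process_archive_alt (records : List (List (String × Int))) : List (List (String × Int)) :=
  pvOuter (pvGroups records) none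

-- ===== PRECONDITION & SPEC =====
-- A raises KeyError on a record lacking a "year" or "month" key; exactly those are excluded.
def Pre_process_archive (records : List (List (String × Int))) : Prop :=
  ∀ r ∈ records, (pvGetK r "year").isSome ∧ (pvGetK r "month").isSome
instance (records : List (List (String × Int))) : Decidable (Pre_process_archive records) := by
  unfold Pre_process_archive; infer_instance

def pvWitness_process_archive : (List (List (String × Int))) :=
  [[("year", 2020), ("month", 3), ("n", 5)], [("year", 2021), ("month", 2), ("n", 1)]]

def Spec_process_archive (records : List (List (String × Int))) (out : List (List (String × Int))) : Prop := out = process_archive_alt records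
instance (records : List (List (String × Int))) (out : List (List (String × Int))) : Decidable (Spec_process_archive records out) := by unfold Spec_process_archive; infer_instance

-- ===== CLAIM (what is proved, stated in full; the proofs are below) =====
def Claim_equal_process_archive : Prop := ∀ (records : List (List (String × Int))), Dom_process_archive records → Pre_process_archive records → Spec_process_archive records (process_archive records)

-- ===== LEMMAS AND PROOFS =====

-- shifting a step-1 range under a map: A pads with `last + i` over range(1, m-last),
-- B pads with `mm` over range(last+1, m)
lemma pad_shift {A : Type} (lm m : Int) (f : Int → A) :
    (PySem.List.pyRange 1 (m - lm) 1).map (fun i => f (lm + i))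
      = (PySem.List.pyRange (lm + 1) m 1).map f := by
  simp only [PySem.List.pyRange_one, List.map_map]
  rw [show m - (lm + 1) = m - lm - 1 by ring]
  apply List.map_congr_left
  intro k _
  exact congrArg f (by ring)

-- A's guarded month pad from state `lm` equals B's unguarded range(lm+1, m) pad
lemma monthPad_eq {A : Type} (lm m : Int) (f : Int → A) :
    (if m - 1 ≠ lm then (PySem.List.pyRange 1 (m - lm) 1).map (fun i => f (lm + i)) else [])
      = (PySem.List.pyRange (lm + 1) m 1).map f := by
  by_cases h : m - 1 = lm
  · rw [if_neg (by simpa using h), PySem.List.pyRange_one_eq_nil (by omega)]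
    simp
  · rw [if_pos h, pad_shift]

-- inside a run of year y, A's loop from state (some y, lm) is B's inner loop
lemma inner_eq (y : Int) (g : List (List (String × Int))) :
    ∀ (t : List (List (String × Int))) (lm : Int),
    (∀ r ∈ g, (pvGetK r "year").getD 0 = y) →
    paGo (some y) lm (g ++ t)
      = (pvInner y g lm).1 ++ paGo (some y) (pvInner y g lm).2 t := by
  induction g with
  | nil => intro t lm _; simp [pvInner]
  | cons r g' ih =>
    intro t lm hg
    have hry : (pvGetK r "year").getD 0 = y := hg r (by simp)
    simp only [List.cons_append, paGo, pvInner]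
    rw [hry]
    rw [if_neg (show ¬((some y : Option Int) ≠ some y ∧ lm ≠ 0) by simp)]
    rw [if_neg (show ¬((some y : Option Int) ≠ some y) by simp)]
    rw [monthPad_eq lm ((pvGetK r "month").getD 0)
      (fun m => [("n", (0 : Int)), ("year", y), ("month", m)])]
    rw [ih t ((pvGetK r "month").getD 0) (fun s hs => hg s (by simp [hs]))]
    simp

-- main invariant: A's loop, started at a group boundary (the next record's year differs
-- from the carried one), equals B's outer loop over the remaining year-runs
lemma outer_eq : ∀ (n : Nat) (records : List (List (String × Int))) (prev : Option (Int × Int)),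
    records.length ≤ n →
    (∀ p, prev = some p → ∀ r, records.head? = some r → (pvGetK r "year").getD 0 ≠ p.1) →
    paGo (prev.map Prod.fst) ((prev.map Prod.snd).getD 0) records
      = pvOuter (pvGroups records) prev := by
  intro n
  induction n with
  | zero =>
    intro records prev hlen _
    have hnil : records = [] := List.eq_nil_of_length_eq_zero (Nat.le_zero.mp hlen)
    subst hnil
    cases prev <;> simp [paGo, pvGroups, pvOuter]
  | succ n ih =>
    intro records prev hlen hhd
    cases records with
    | nil => cases prev <;> simp [paGo, pvGroups, pvOuter]
    | cons r rest =>
      rw [pvGroups]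
      set P : List (String × Int) → Bool :=
        (fun s => (pvGetK s "year").getD 0 == (pvGetK r "year").getD 0) with hP
      set ry : Int := (pvGetK r "year").getD 0 with hry
      set rm : Int := (pvGetK r "month").getD 0 with hrm
      set run : List (List (String × Int)) := rest.takeWhile P with hrun
      set rest' : List (List (String × Int)) := rest.dropWhile P with hrest'
      have hyrun : ∀ s ∈ run, (pvGetK s "year").getD 0 = ry := by
        intro s hs
        have hps : P s = true := List.mem_takeWhile_imp (hrun ▸ hs)
        simpa [hP, hry] using hps
      have hsplit : run ++ rest' = rest := List.takeWhile_append_dropWhile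
      -- the recursive call: rest' starts a new group boundary
      have hrec : paGo (some ry) (pvInner ry run rm).2 rest'
          = pvOuter (pvGroups rest') (some (ry, (pvInner ry run rm).2)) := by
        have h1 : rest'.length ≤ n := by
          have h2 : rest'.length ≤ rest.length := hrest' ▸ List.length_dropWhile_le P rest
          have h3 : rest.length + 1 ≤ n + 1 := by simpa using hlen
          omega
        have h2 : ∀ p, (some (ry, (pvInner ry run rm).2) : Option (Int × Int)) = some p →
            ∀ s, rest'.head? = some s → (pvGetK s "year").getD 0 ≠ p.1 := by
          intro p hp s hs
          cases hp
          have hnp := List.head?_dropWhile_not P rest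
          rw [← hrest', hs] at hnp
          simpa [hP, hry] using hnp
        simpa using ih rest' (some (ry, (pvInner ry run rm).2)) h1 h2
      -- the inner run: A's loop inside the run is B's inner loop
      have hinner : paGo (some ry) rm (run ++ rest')
          = (pvInner ry run rm).1 ++ paGo (some ry) (pvInner ry run rm).2 rest' :=
        inner_eq ry run rest' rm hyrun
      -- peel A's first step and B's first group
      simp only [pvOuter, paGo, pvInner, List.headD_cons, ← hry, ← hrm]
      rw [show rest = run ++ rest' from hsplit.symm] at *
      cases prev with
      | none =>
        rw [if_neg (show ¬((some ry : Option Int) ≠ Option.map Prod.fst none ∧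
              ((Option.map Prod.snd (none : Option (Int × Int))).getD 0 : Int) ≠ 0) by simp)]
        rw [if_pos (show (some ry : Option Int) ≠ Option.map Prod.fst none by simp)]
        rw [monthPad_eq 0 rm (fun m => [("n", (0 : Int)), ("year", ry), ("month", m)])]
        rw [hinner, hrec]
        simp
      | some p =>
        obtain ⟨py, plm⟩ := p
        have hne : ry ≠ py := hhd (py, plm) rfl r rfl
        have hne' : (some ry : Option Int) ≠ Option.map Prod.fst (some (py, plm)) := by
          simpa using hne
        rw [if_pos hne']
        rw [monthPad_eq 0 rm (fun m => [("n", (0 : Int)), ("year", ry), ("month", m)])]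
        by_cases hplm : plm = 0
        · subst hplm
          rw [if_neg (show ¬((some ry : Option Int) ≠ Option.map Prod.fst (some (py, (0:Int))) ∧
                ((Option.map Prod.snd (some (py, (0:Int)))).getD 0 : Int) ≠ 0) by simp)]
          rw [hinner, hrec]
          simp
        · rw [if_pos (show (some ry : Option Int) ≠ Option.map Prod.fst (some (py, plm)) ∧
                ((Option.map Prod.snd (some (py, plm))).getD 0 : Int) ≠ 0 from
              ⟨hne', by simpa using hplm⟩)]
          simp only [Option.map_some, Option.getD_some]
          rw [pad_shift plm 13 (fun m => [("n", (0 : Int)), ("year", py), ("month", m)])]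
          rw [hinner, hrec]
          simp [hplm]

-- ===== VERDICT (by name: the statement is the Claim_ definition above) =====
theorem process_archive_spec : Claim_equal_process_archive := by
  intro records _ _
  unfold Spec_process_archive process_archive process_archive_alt
  exact outer_eq records.length records none le_rfl (by intro p hp; cases hp)
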